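-- pv_equiv track=rewrite | github.com/manwar/perlweeklychallenge-club | challenge-369/roger-bell-west/python/ch-1.py | validtag
-- ===== SOURCE A (Python) =====
-- def validtag(a):
--   p = "#"
--   up = False
--   for c in a:
--     if c.isalpha():
--       cc = c
--       if up:
--         cc = cc.upper()
--         up = False
--       else:
--         cc = cc.lower()
--       p += cc
--     elif c == " " and len(p) > 1:
--       up = True
--   if len(p) > 100:
--     p = p[0:100]
--   return p
-- ===== SOURCE B (Python) =====
-- def validtag(a):
--     parts = []
--     started = False
--     for frag in a.split(' '):
--         letters = ''.join(c for c in frag if c.isalpha())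
--         if not letters:
--             continue
--         if started:
--             parts.append(letters[0].upper() + letters[1:].lower())
--         else:
--             parts.append(letters.lower())
--             started = True
--     return ('#' + ''.join(parts))[:100]
-- ===== Notes on version B (the rewrite author's own statement) =====
-- stated objective: alternative
-- what changed: A is a character-by-character state machine with an 'uppercase next letter' flag; B splits the string on spaces and processes whole words - filtering each word to its letters, lowercasing the first lettered word and capitalizing every later one - then joins, prepends '#' and truncates to 100.
import Mathlib
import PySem

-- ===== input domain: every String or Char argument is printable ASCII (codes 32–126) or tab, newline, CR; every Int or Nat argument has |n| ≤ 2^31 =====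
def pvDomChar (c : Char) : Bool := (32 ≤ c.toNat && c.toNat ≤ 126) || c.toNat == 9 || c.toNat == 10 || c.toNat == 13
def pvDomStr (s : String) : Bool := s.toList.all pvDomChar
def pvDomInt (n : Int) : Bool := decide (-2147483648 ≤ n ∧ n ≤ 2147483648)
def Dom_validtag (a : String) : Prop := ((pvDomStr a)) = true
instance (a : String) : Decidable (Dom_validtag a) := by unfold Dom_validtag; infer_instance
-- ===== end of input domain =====

-- B re-implements the char-by-char state machine as a split-on-space word pipeline
-- (filter letters per word, lowercase first word, capitalize the rest); objective: alternative decomposition, same cost.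

-- ===== PORT A =====
-- one step of A's for-loop: state = (p, up)
def validtagStep (s : List Char × Bool) (c : Char) : List Char × Bool :=
  if PySem.Chars.isalpha c then
    (s.1 ++ [if s.2 then PySem.Chars.upperChar c else PySem.Chars.lowerChar c], false)
  else if c = ' ' ∧ 1 < s.1.length then (s.1, true)
  else s

def validtag (a : String) : String :=
  let r := a.toList.foldl validtagStep (['#'], false)
  let p := if 100 < r.1.length then PySem.List.slice r.1 (some 0) (some 100) else r.1
  String.mk p

-- ===== PORT B =====
-- letters[0].upper() + letters[1:].lower()
def capWord (w : List Char) : List Char :=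
  match w with
  | [] => []
  | c :: rest => PySem.Chars.upperChar c :: PySem.Chars.lower rest

-- one iteration of B's for-loop: state = (parts, started)
def validtagAltStep (s : List (List Char) × Bool) (frag : List Char) : List (List Char) × Bool :=
  let letters := frag.filter PySem.Chars.isalpha
  if letters = [] then s
  else if s.2 then (s.1 ++ [capWord letters], s.2)
  else (s.1 ++ [PySem.Chars.lower letters], true)

def validtag_alt (a : String) : String :=
  let frags := a.toList.splitOn ' '
  let r := frags.foldl validtagAltStep ([], false)
  String.mk (PySem.List.slice ('#' :: PySem.Chars.join [] r.1) none (some 100))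

-- ===== PRECONDITION & SPEC =====
def Spec_validtag (a : String) (out : String) : Prop := out = validtag_alt a
instance (a : String) (out : String) : Decidable (Spec_validtag a out) := by unfold Spec_validtag; infer_instance

-- ===== CLAIM (what is proved, stated in full; the proofs are below) =====
def Claim_equal_validtag : Prop := ∀ (a : String), Dom_validtag a → Spec_validtag a (validtag a)

-- ===== LEMMAS AND PROOFS =====

-- B's appended piece for each fragment once "started"
def caps (fs : List (List Char)) : List (List Char) :=
  fs.filterMap (fun f =>
    let l := f.filter PySem.Chars.isalpha
    if l = [] then none else some (capWord l))

theorem caps_nil : caps [] = [] := rfl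

theorem caps_cons_nil (f : List Char) (fs : List (List Char))
    (hl : f.filter PySem.Chars.isalpha = []) : caps (f :: fs) = caps fs := by
  simp only [caps, List.filterMap_cons, hl]; simp

theorem caps_cons (f : List Char) (fs : List (List Char))
    (hl : f.filter PySem.Chars.isalpha ≠ []) :
    caps (f :: fs) = capWord (f.filter PySem.Chars.isalpha) :: caps fs := by
  simp only [caps, List.filterMap_cons, if_neg hl]

theorem joinE (xs : List (List Char)) : PySem.Chars.join [] xs = xs.flatten := by
  induction xs with
  | nil => simp [PySem.Chars.join_nil]
  | cons x ys ih =>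
    cases ys with
    | nil => simp [PySem.Chars.join, List.intercalate]
    | cons y zs => simp [PySem.Chars.join_cons_cons] at *; simpa using ih

theorem mem_splitOnP_not {p : Char → Bool} :
    ∀ (xs : List Char) (f : List Char), f ∈ xs.splitOnP p → ∀ c ∈ f, ¬ p c := by
  intro xs
  induction xs with
  | nil => intro f hf c hc; simp [List.splitOnP_nil] at hf; subst hf; simp at hc
  | cons x xs ih =>
    intro f hf c hc
    rw [List.splitOnP_cons] at hf
    by_cases hx : p x
    · simp [hx] at hf
      rcases hf with hf | hf
      · subst hf; simp at hc
      · exact ih f hf c hc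
    · simp [hx] at hf
      rcases hrec : xs.splitOnP p with _ | ⟨h, t⟩
      · exact absurd hrec (List.splitOnP_ne_nil _ _)
      · rw [hrec] at hf
        simp [List.modifyHead] at hf
        rcases hf with rfl | hf
        · rcases List.mem_cons.mp hc with rfl | hc'
          · exact hx
          · exact ih h (by rw [hrec]; exact List.mem_cons_self) c hc'
        · exact ih f (by rw [hrec]; exact List.mem_cons_of_mem _ hf) c hc

theorem splitOn_no_sep (xs : List Char) :
    ∀ f ∈ xs.splitOn ' ', ∀ c ∈ f, c ≠ ' ' := by
  intro f hf c hc
  have := mem_splitOnP_not (p := (· == ' ')) xs f hf c hc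
  simpa using this

-- folding A's loop over a space-free fragment with up = false
theorem foldA_frag_false :
    ∀ (cs : List Char) (p : List Char), (∀ c ∈ cs, c ≠ ' ') →
    cs.foldl validtagStep (p, false) =
      (p ++ PySem.Chars.lower (cs.filter PySem.Chars.isalpha), false) := by
  intro cs
  induction cs with
  | nil => intro p _; simp [PySem.Chars.lower]
  | cons c cs ih =>
    intro p h
    by_cases hc : PySem.Chars.isalpha c
    · simp only [List.foldl_cons, validtagStep, hc, if_true, Bool.false_eq_true]
      rw [ih _ (fun d hd => h d (List.mem_cons_of_mem _ hd))]
      simp [hc, PySem.Chars.lower]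
    · have hcs : c ≠ ' ' := h c List.mem_cons_self
      simp only [List.foldl_cons, validtagStep, hc, if_false, Bool.false_eq_true]
      rw [if_neg (by simp [hcs])]
      rw [ih _ (fun d hd => h d (List.mem_cons_of_mem _ hd))]
      simp [hc]

-- folding A's loop over a space-free fragment, general up flag
theorem foldA_frag :
    ∀ (cs : List Char) (p : List Char) (up : Bool), (∀ c ∈ cs, c ≠ ' ') →
    cs.foldl validtagStep (p, up) =
      (if cs.filter PySem.Chars.isalpha = [] then (p, up)
       else (p ++ (if up then capWord (cs.filter PySem.Chars.isalpha)
                   else PySem.Chars.lower (cs.filter PySem.Chars.isalpha)), false)) := by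
  intro cs p up h
  cases up with
  | false =>
    rw [foldA_frag_false cs p h]
    by_cases hl : cs.filter PySem.Chars.isalpha = []
    · simp [hl, PySem.Chars.lower]
    · simp [hl]
  | true =>
    induction cs generalizing p with
    | nil => simp
    | cons c cs ih =>
      by_cases hc : PySem.Chars.isalpha c
      · simp only [List.foldl_cons, validtagStep, hc, if_true]
        rw [foldA_frag_false cs _ (fun d hd => h d (List.mem_cons_of_mem _ hd))]
        simp [hc, capWord]
      · have hcs : c ≠ ' ' := h c List.mem_cons_self
        simp only [List.foldl_cons, validtagStep, hc, if_false, Bool.false_eq_true]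
        rw [if_neg (by simp [hcs])]
        rw [ih p (fun d hd => h d (List.mem_cons_of_mem _ hd))]
        simp [hc]

-- B's loop from a started state appends caps
theorem foldB_started :
    ∀ (fs : List (List Char)) (parts : List (List Char)),
    fs.foldl validtagAltStep (parts, true) = (parts ++ caps fs, true) := by
  intro fs
  induction fs with
  | nil => intro parts; simp [caps]
  | cons f fs ih =>
    intro parts
    by_cases hl : f.filter PySem.Chars.isalpha = []
    · simp only [List.foldl_cons, validtagAltStep, hl, if_true]
      rw [ih, caps_cons_nil _ _ hl]
    · simp only [List.foldl_cons, validtagAltStep, hl, if_false]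
      simp only [if_true]
      rw [ih, caps_cons _ _ hl]; simp

-- A's loop over space-separated fragments, started state
theorem foldA_started :
    ∀ (fs : List (List Char)) (p : List Char),
    (∀ f ∈ fs, ∀ c ∈ f, c ≠ ' ') → 1 < p.length →
    ((PySem.Chars.join [' '] fs).foldl validtagStep (p, true)).1 =
      p ++ (caps fs).flatten := by
  intro fs
  induction fs with
  | nil => intro p _ _; simp [PySem.Chars.join_nil, caps]
  | cons f fs ih =>
    intro p h hp
    cases fs with
    | nil =>
      have hj : PySem.Chars.join [' '] [f] = f := by
        simp [PySem.Chars.join, List.intercalate]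
      rw [hj, foldA_frag f p true (h f List.mem_cons_self)]
      by_cases hl : f.filter PySem.Chars.isalpha = []
      · rw [if_pos hl, caps_cons_nil _ _ hl, caps_nil]; simp
      · rw [if_neg hl, caps_cons _ _ hl, caps_nil]; simp
    | cons g rest =>
      rw [PySem.Chars.join_cons_cons, List.foldl_append, List.foldl_append,
        foldA_frag f p true (h f List.mem_cons_self)]
      by_cases hl : f.filter PySem.Chars.isalpha = []
      · rw [if_pos hl]
        have hs : validtagStep (p, true) ' ' = (p, true) := by
          have : PySem.Chars.isalpha ' ' = false := by decide
          simp [validtagStep, this, hp]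
        simp only [List.foldl_cons, List.foldl_nil, hs]
        rw [ih p (fun f' hf' => h f' (List.mem_cons_of_mem _ hf')) hp,
          caps_cons_nil _ _ hl]
      · rw [if_neg hl, if_pos rfl]
        have hp' : 1 < (p ++ capWord (f.filter PySem.Chars.isalpha)).length := by
          simp only [List.length_append]; omega
        have hs : validtagStep (p ++ capWord (f.filter PySem.Chars.isalpha), false) ' '
            = (p ++ capWord (f.filter PySem.Chars.isalpha), true) := by
          have : PySem.Chars.isalpha ' ' = false := by decide
          simp [validtagStep, this]
          omega
        simp only [List.foldl_cons, List.foldl_nil, hs]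
        rw [ih _ (fun f' hf' => h f' (List.mem_cons_of_mem _ hf')) hp',
          caps_cons _ _ hl]
        simp

-- main lemma: A's loop from the initial state vs B's
theorem foldA_main :
    ∀ (fs : List (List Char)),
    (∀ f ∈ fs, ∀ c ∈ f, c ≠ ' ') →
    ((PySem.Chars.join [' '] fs).foldl validtagStep (['#'], false)).1 =
      '#' :: ((fs.foldl validtagAltStep ([], false)).1).flatten := by
  intro fs
  induction fs with
  | nil => simp [PySem.Chars.join_nil]
  | cons f fs ih =>
    intro h
    cases fs with
    | nil =>
      have hj : PySem.Chars.join [' '] [f] = f := by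
        simp [PySem.Chars.join, List.intercalate]
      rw [hj, foldA_frag f ['#'] false (h f List.mem_cons_self)]
      by_cases hl : f.filter PySem.Chars.isalpha = []
      · rw [if_pos hl]
        simp [validtagAltStep, hl]
      · rw [if_neg hl]
        simp [validtagAltStep, hl]
    | cons g rest =>
      rw [PySem.Chars.join_cons_cons, List.foldl_append, List.foldl_append,
        foldA_frag f ['#'] false (h f List.mem_cons_self)]
      by_cases hl : f.filter PySem.Chars.isalpha = []
      · rw [if_pos hl]
        have hs : validtagStep (['#'], false) ' ' = (['#'], false) := by
          have : PySem.Chars.isalpha ' ' = false := by decide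
          simp [validtagStep, this]
        simp only [List.foldl_cons, List.foldl_nil, hs]
        rw [ih (fun f' hf' => h f' (List.mem_cons_of_mem _ hf'))]
        simp only [List.foldl_cons]
        have : validtagAltStep ([], false) f = ([], false) := by
          simp [validtagAltStep, hl]
        rw [this]
      · rw [if_neg hl]
        have hlen : 0 < (f.filter PySem.Chars.isalpha).length :=
          List.length_pos_of_ne_nil hl
        have hp' : 1 < (['#'] ++ PySem.Chars.lower (f.filter PySem.Chars.isalpha)).length := by
          simp only [List.length_append, PySem.Chars.lower, List.length_map,
            List.length_singleton]
          omega
        have hs : validtagStep (['#'] ++ PySem.Chars.lower (f.filter PySem.Chars.isalpha), false) ' '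
            = (['#'] ++ PySem.Chars.lower (f.filter PySem.Chars.isalpha), true) := by
          have : PySem.Chars.isalpha ' ' = false := by decide
          have hex : ∃ x ∈ f, PySem.Chars.isalpha x = true := by
            simpa [List.filter_eq_nil_iff] using hl
          simp [validtagStep, this, hex, PySem.Chars.lower]
        simp only [if_neg (Bool.false_ne_true), List.foldl_cons, List.foldl_nil, hs]
        rw [foldA_started (g :: rest) _ (fun f' hf' => h f' (List.mem_cons_of_mem _ hf')) hp']
        have hb : validtagAltStep ([], false) f
            = ([PySem.Chars.lower (f.filter PySem.Chars.isalpha)], true) := by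
          simp [validtagAltStep, hl]
        rw [hb, ← List.foldl_cons, foldB_started]
        simp

-- ===== VERDICT (by name: the statement is the Claim_ definition above) =====
theorem validtag_spec : Claim_equal_validtag := by
  intro a _
  show validtag a = validtag_alt a
  have hsplit : PySem.Chars.join [' '] (a.toList.splitOn ' ') = a.toList :=
    List.intercalate_splitOn a.toList ' '
  have key := foldA_main (a.toList.splitOn ' ') (splitOn_no_sep a.toList)
  rw [hsplit] at key
  simp only [validtag, validtag_alt, joinE, key]
  set L := '#' :: ((a.toList.splitOn ' ').foldl validtagAltStep ([], false)).1.flatten with hL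
  have hslice : PySem.List.slice L none (some 100) = L.take 100 := by
    rw [PySem.List.slice_to L (by norm_num)]
    rfl
  rw [hslice]
  by_cases hlen : 100 < L.length
  · rw [if_pos hlen]
    rw [show PySem.List.slice L (some 0) (some 100) = PySem.List.slice L none (some 100) from
      PySem.List.slice_zero_start L (some 100), hslice]
  · rw [if_neg hlen, List.take_of_length_le (by omega)]
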